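-- pv_equiv track=rewrite | github.com/Rstar-910/CrewAI-Translation-Crew | translation_engine.py | _align_translations_with_inputs
-- ===== SOURCE A (Python) =====
-- from typing import List, Dict, Any
--
-- def _align_translations_with_inputs(translated_texts: List[str],
--                                   batch_texts: List[str]) -> List[str]:
--     """Align translated texts with input texts, handling empty paragraphs."""
--     result_translations = []
--     translated_index = 0
--
--     for original_text in batch_texts:
--         if original_text.strip():  # Non-empty text
--             if translated_index < len(translated_texts):
--                 result_translations.append(translated_texts[translated_index])
--                 translated_index += 1
--             else:
--                 result_translations.append(original_text)  # Fallback to original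
--         else:
--             result_translations.append(original_text)  # Keep empty text as-is
--
--     return result_translations
-- ===== SOURCE B (Python) =====
-- from typing import List
--
-- def _align_translations_with_inputs(translated_texts: List[str],
--                                   batch_texts: List[str]) -> List[str]:
--     non_empty_indices = [i for i, t in enumerate(batch_texts) if t.strip()]
--     result = list(batch_texts)
--     for i, t in zip(non_empty_indices, translated_texts):
--         result[i] = t
--     return result
-- ===== Notes on version B (the rewrite author's own statement) =====
-- stated objective: alternative
-- what changed: Replaces the interleaved conditional-counter pass with a collect-nonempty-indices + copy-original + zip-truncated targeted overwrite; zip truncation covers both the exhausted-translations fallback and surplus translations.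
import Mathlib
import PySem

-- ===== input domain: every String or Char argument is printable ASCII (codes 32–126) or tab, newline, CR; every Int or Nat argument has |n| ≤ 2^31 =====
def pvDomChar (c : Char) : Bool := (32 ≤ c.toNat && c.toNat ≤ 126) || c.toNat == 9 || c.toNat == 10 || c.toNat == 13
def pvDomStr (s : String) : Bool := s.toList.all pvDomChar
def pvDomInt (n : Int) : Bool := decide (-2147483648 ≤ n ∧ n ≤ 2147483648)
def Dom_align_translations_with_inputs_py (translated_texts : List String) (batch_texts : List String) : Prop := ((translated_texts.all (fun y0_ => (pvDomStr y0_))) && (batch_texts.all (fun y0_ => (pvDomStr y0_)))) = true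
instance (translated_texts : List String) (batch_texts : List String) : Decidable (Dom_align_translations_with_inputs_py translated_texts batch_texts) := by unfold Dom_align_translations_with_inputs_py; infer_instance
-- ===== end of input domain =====

-- B replaces A's interleaved conditional-counter pass by collect-nonempty-indices + copy + zip-truncated overwrite (objective: alternative; same cost).

-- ===== PORT A =====
-- loop state: (result_translations, translated_index); translated_texts[translated_index]
-- is guarded by 'translated_index < len', so pyGetD's default is never used.
def align_translations_with_inputs_py (translated_texts : List String) (batch_texts : List String) : List String :=
  (batch_texts.foldl (fun (st : List String × Int) original_text =>
    if PySem.Str.strip original_text ≠ "" then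
      if st.2 < (translated_texts.length : Int) then
        (st.1 ++ [PySem.List.pyGetD translated_texts st.2 ""], st.2 + 1)
      else
        (st.1 ++ [original_text], st.2)
    else
      (st.1 ++ [original_text], st.2)) ([], 0)).1

-- ===== PORT B =====
-- result[i] = t is pySetD (i is always a valid nonnegative index of result here, so it is exact).
def align_translations_with_inputs_py_alt (translated_texts : List String) (batch_texts : List String) : List String :=
  let nonEmptyIndices := ((PySem.List.enumerate batch_texts 0).filter
      (fun p => PySem.Str.strip p.2 ≠ "")).map Prod.fst
  (nonEmptyIndices.zip translated_texts).foldl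
    (fun res p => PySem.List.pySetD res p.1 p.2) batch_texts

-- ===== PRECONDITION & SPEC =====
def Spec_align_translations_with_inputs_py (translated_texts : List String) (batch_texts : List String) (out : List String) : Prop := out = align_translations_with_inputs_py_alt translated_texts batch_texts
instance (translated_texts : List String) (batch_texts : List String) (out : List String) : Decidable (Spec_align_translations_with_inputs_py translated_texts batch_texts out) := by unfold Spec_align_translations_with_inputs_py; infer_instance

-- ===== CLAIM (what is proved, stated in full; the proofs are below) =====
def Claim_equal_align_translations_with_inputs_py : Prop := ∀ (translated_texts : List String) (batch_texts : List String), Dom_align_translations_with_inputs_py translated_texts batch_texts → Spec_align_translations_with_inputs_py translated_texts batch_texts (align_translations_with_inputs_py translated_texts batch_texts)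

-- ===== LEMMAS AND PROOFS =====

-- common recursive characterisation of both ports
def alignSpec : List String → List String → List String
  | _, [] => []
  | ts, b :: bs =>
    if PySem.Str.strip b ≠ "" then
      match ts with
      | t :: ts' => t :: alignSpec ts' bs
      | [] => b :: alignSpec [] bs
    else b :: alignSpec ts bs

theorem alignSpec_nil (bs : List String) : alignSpec [] bs = bs := by
  induction bs with
  | nil => rfl
  | cons b bs ih => by_cases h : PySem.Str.strip b ≠ "" <;> simp [alignSpec, h, ih]

-- ---- A = alignSpec ----
theorem portA_go (ts : List String) (bs : List String) (acc : List String) (k : Nat)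
    (hk : k ≤ ts.length) :
    (bs.foldl (fun (st : List String × Int) original_text =>
      if PySem.Str.strip original_text ≠ "" then
        if st.2 < (ts.length : Int) then
          (st.1 ++ [PySem.List.pyGetD ts st.2 ""], st.2 + 1)
        else (st.1 ++ [original_text], st.2)
      else (st.1 ++ [original_text], st.2)) (acc, (k : Int))).1
      = acc ++ alignSpec (ts.drop k) bs := by
  induction bs generalizing acc k with
  | nil => simp [alignSpec]
  | cons b bs ih =>
    simp only [List.foldl_cons]
    by_cases hb : PySem.Str.strip b ≠ ""
    · rw [if_pos hb]
      by_cases hlt : k < ts.length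
      · have hdrop : ts.drop k = ts[k] :: ts.drop (k + 1) := List.drop_eq_getElem_cons hlt
        have hget : PySem.List.pyGetD ts ((k : Nat) : Int) "" = ts[k] :=
          PySem.List.pyGetD_ofNat ts k "" hlt
        have hc : ((k : Int) + 1) = ((k + 1 : Nat) : Int) := by push_cast; ring
        rw [if_pos (by exact_mod_cast hlt : (k : Int) < (ts.length : Int)), hget, hc,
          ih _ (k + 1) (by omega)]
        rw [hdrop]
        simp only [alignSpec, if_pos hb]
        simp
      · have hdrop : ts.drop k = [] := by
          have : k = ts.length := by omega
          simp [this]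
        rw [if_neg (by omega : ¬ ((k : Int) < (ts.length : Int))), ih _ k hk]
        simp [hdrop, alignSpec, hb]
    · rw [if_neg hb]
      rw [ih _ k hk]
      cases h : ts.drop k with
      | nil => simp [h, alignSpec, hb]
      | cons t ts' => simp [h, alignSpec, hb]

theorem portA_eq_spec (ts bs : List String) :
    align_translations_with_inputs_py ts bs = alignSpec ts bs := by
  have := portA_go ts bs [] 0 (by omega)
  simpa [align_translations_with_inputs_py] using this

-- ---- B = alignSpec ----

def idxOf (bs : List String) (s : Int) : List Int :=
  ((PySem.List.enumerate bs s).filter (fun p => PySem.Str.strip p.2 ≠ "")).map Prod.fst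

theorem idxOf_shift (bs : List String) (s : Int) :
    idxOf bs (s + 1) = (idxOf bs s).map (· + 1) := by
  induction bs generalizing s with
  | nil => simp [idxOf, PySem.List.enumerate_nil]
  | cons b bs ih =>
    unfold idxOf
    rw [PySem.List.enumerate_cons, PySem.List.enumerate_cons]
    have h2 := ih (s + 1)
    unfold idxOf at h2
    simp only [List.filter_cons]
    by_cases hb : PySem.Str.strip b ≠ "" <;> simp [hb] <;> simpa using h2

theorem idxOf_cons (b : String) (bs : List String) (s : Int) :
    idxOf (b :: bs) s
      = (if PySem.Str.strip b ≠ "" then [s] else []) ++ idxOf bs (s + 1) := by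
  unfold idxOf
  rw [PySem.List.enumerate_cons]
  by_cases hb : PySem.Str.strip b ≠ "" <;> simp [List.filter_cons, hb]

theorem idxOf_nonneg (bs : List String) (s : Int) (hs : 0 ≤ s) :
    ∀ i ∈ idxOf bs s, 0 ≤ i := by
  induction bs generalizing s with
  | nil => simp [idxOf, PySem.List.enumerate_nil]
  | cons b bs ih =>
    intro i hi
    rw [idxOf_cons] at hi
    rcases List.mem_append.mp hi with h | h
    · by_cases hb : PySem.Str.strip b ≠ ""
      · simp [hb] at h; omega
      · simp [hb] at h
    · exact ih (s + 1) (by omega) i h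

theorem foldl_set_shift (pairs : List (Int × String)) (b : String) (r : List String)
    (h : ∀ p ∈ pairs, 1 ≤ p.1) :
    pairs.foldl (fun res p => PySem.List.pySetD res p.1 p.2) (b :: r)
      = b :: (pairs.map (fun p => (p.1 - 1, p.2))).foldl
          (fun res p => PySem.List.pySetD res p.1 p.2) r := by
  induction pairs generalizing r with
  | nil => simp
  | cons p ps ih =>
    have hp : 1 ≤ p.1 := h p (by simp)
    have hset : PySem.List.pySetD (b :: r) p.1 p.2
        = b :: PySem.List.pySetD r (p.1 - 1) p.2 := by
      rw [PySem.List.pySetD_of_nonneg _ _ (by omega),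
          PySem.List.pySetD_of_nonneg _ _ (by omega)]
      have ht : p.1.toNat = (p.1 - 1).toNat + 1 := by omega
      rw [ht]
      simp [List.set]
    simp only [List.foldl_cons, hset, List.map_cons]
    exact ih _ (fun q hq => h q (by simp [hq]))

theorem unshift_shift (l : List (Int × String)) :
    (l.map (fun p => (p.1 + 1, p.2))).map (fun p => (p.1 - 1, p.2)) = l := by
  have hcomp : ((fun p : Int × String => (p.1 - 1, p.2)) ∘ fun p => (p.1 + 1, p.2)) = id := by
    funext p; cases p; simp
  rw [List.map_map, hcomp, List.map_id]

theorem portB_go (bs ts : List String) :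
    ((idxOf bs 0).zip ts).foldl (fun res p => PySem.List.pySetD res p.1 p.2) bs
      = alignSpec ts bs := by
  induction bs generalizing ts with
  | nil => simp [idxOf, PySem.List.enumerate_nil, alignSpec]
  | cons b bs ih =>
    have hsh : idxOf (b :: bs) 0
        = (if PySem.Str.strip b ≠ "" then [(0 : Int)] else []) ++ (idxOf bs 0).map (· + 1) := by
      rw [idxOf_cons]
      rw [show (0 : Int) + 1 = 0 + 1 by ring, idxOf_shift bs 0]
    have hmapzip : ∀ ts' : List String,
        ((idxOf bs 0).map (· + 1)).zip ts'
          = ((idxOf bs 0).zip ts').map (fun p => (p.1 + 1, p.2)) := by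
      intro ts'; rw [List.zip_map_left]; rfl
    have hone : ∀ ts' : List String, ∀ p ∈ ((idxOf bs 0).zip ts').map (fun p => (p.1 + 1, p.2)),
        1 ≤ p.1 := by
      intro ts' p hp
      simp only [List.mem_map] at hp
      obtain ⟨q, hq, rfl⟩ := hp
      have := idxOf_nonneg bs 0 (by omega) q.1 (List.of_mem_zip hq).1
      show 1 ≤ q.1 + 1
      omega
    by_cases hb : PySem.Str.strip b ≠ ""
    · cases ts with
      | nil => simp [hsh, hb, alignSpec, alignSpec_nil]
      | cons t ts' =>
        rw [hsh, if_pos hb]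
        simp only [List.cons_append, List.nil_append, List.zip_cons_cons,
          List.foldl_cons, hmapzip ts']
        have h0 : PySem.List.pySetD (b :: bs) (0 : Int) t = t :: bs := by
          rw [PySem.List.pySetD_of_nonneg _ _ (by omega)]; rfl
        rw [h0, foldl_set_shift _ _ _ (hone ts'), unshift_shift, ih ts']
        simp [alignSpec, hb]
    · rw [hsh, if_neg hb]
      simp only [List.nil_append, hmapzip ts]
      rw [foldl_set_shift _ _ _ (hone ts), unshift_shift, ih ts]
      simp [alignSpec, hb]

theorem portB_eq_spec (ts bs : List String) :
    align_translations_with_inputs_py_alt ts bs = alignSpec ts bs := by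
  have := portB_go bs ts
  simpa [align_translations_with_inputs_py_alt, idxOf] using this

-- ===== VERDICT (by name: the statement is the Claim_ definition above) =====
theorem align_translations_with_inputs_py_spec : Claim_equal_align_translations_with_inputs_py := by
  intro ts bs _
  unfold Spec_align_translations_with_inputs_py
  rw [portA_eq_spec, portB_eq_spec]
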